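-- pv_equiv track=rewrite | github.com/marcoscastro/msc_bioinfo | alignment_algorithms/blast/score_matrix.py | score_pairwise
-- ===== SOURCE A (Python) =====
-- def score_pairwise(sequence1, sequence2, matrix, gap_open=-5, gap_extend=-1):
-- 	score, gap, len_sequence1 = 0, False, len(sequence1)
-- 	for i in range(len_sequence1):
-- 		pair = (sequence1[i], sequence2[i])
-- 		if not gap:
-- 			# if not gap and exists '-' in pair, then add gap_open and updates gap to True
-- 			if '-' in pair:
-- 				gap = True # updates gap's flag
-- 				score += gap_open # add gap_open
-- 			else:
-- 				# add score of the matrix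
-- 				try:
-- 					score += matrix[pair]
-- 				except:
-- 					score += matrix[tuple(reversed(pair))]
-- 		else:
-- 			# if gap is True and '-' not in pair, then add score of the matrix and updates gap to False
-- 			if '-' not in pair:
-- 				gap = False # updates gap's flag
-- 				# add score of the matrix
-- 				try:
-- 					score += matrix[pair]
-- 				except:
-- 					score += matrix[tuple(reversed(pair))]
-- 			else:
-- 				# if gap is True and exists '-' in pair, then add gap_extend
-- 				score += gap_extend # add gap_extend
-- 	return score
-- ===== SOURCE B (Python) =====
-- def score_pairwise(sequence1, sequence2, matrix, gap_open=-5, gap_extend=-1):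
-- 	# Run-length decomposition: split the columns into maximal gap / non-gap
-- 	# runs, score each run in closed form, then sum the run contributions.
-- 	pairs = [(sequence1[i], sequence2[i]) for i in range(len(sequence1))]
-- 	runs = []
-- 	for p in pairs:
-- 		g = '-' in p
-- 		if runs and runs[-1][0] == g:
-- 			runs[-1][1].append(p)
-- 		else:
-- 			runs.append((g, [p]))
-- 	def lookup(p):
-- 		try:
-- 			return matrix[p]
-- 		except:
-- 			return matrix[tuple(reversed(p))]
-- 	score = 0
-- 	for g, run in runs:
-- 		if g:
-- 			score += gap_open + gap_extend * (len(run) - 1)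
-- 		else:
-- 			score += sum(lookup(p) for p in run)
-- 	return score
-- ===== Notes on version B (the rewrite author's own statement) =====
-- stated objective: alternative
-- what changed: A threads a mutable gap flag through a single per-column loop; B first builds the column-pair list, splits it into maximal consecutive gap / non-gap runs (run-length encoding), scores each gap run in closed form as gap_open + gap_extend*(L-1) and each non-gap run as a sum of matrix lookups, then sums the run contributions.
import Mathlib
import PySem

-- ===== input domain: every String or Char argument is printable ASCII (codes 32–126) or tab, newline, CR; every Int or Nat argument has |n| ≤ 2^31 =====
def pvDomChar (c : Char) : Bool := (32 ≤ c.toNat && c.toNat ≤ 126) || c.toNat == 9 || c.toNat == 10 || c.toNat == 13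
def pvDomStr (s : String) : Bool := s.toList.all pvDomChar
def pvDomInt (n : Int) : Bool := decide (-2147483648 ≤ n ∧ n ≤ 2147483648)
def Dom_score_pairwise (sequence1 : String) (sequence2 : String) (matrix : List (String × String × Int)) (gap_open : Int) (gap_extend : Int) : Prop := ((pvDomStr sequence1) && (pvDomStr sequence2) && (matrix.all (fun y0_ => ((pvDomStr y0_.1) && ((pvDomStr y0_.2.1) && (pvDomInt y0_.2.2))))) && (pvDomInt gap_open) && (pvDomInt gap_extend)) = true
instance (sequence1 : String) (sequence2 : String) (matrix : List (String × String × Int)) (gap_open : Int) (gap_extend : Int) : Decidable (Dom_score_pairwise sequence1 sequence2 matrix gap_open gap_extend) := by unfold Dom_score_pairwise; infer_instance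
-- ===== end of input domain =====

-- B replaces A's per-column stateful gap-flag loop by a run-length decomposition:
-- split the columns into maximal gap / non-gap runs and score each run in closed
-- form (objective: alternative decomposition, same cost).

-- ===== PORT A =====
-- matrix[(x, y)] : first matching entry (dict as association list); none = KeyError
def pvLookMat (matrix : List (String × String × Int)) (x y : Char) : Option Int :=
  match matrix with
  | [] => none
  | (a, b, v) :: rest =>
    if a.toList = [x] ∧ b.toList = [y] then some v else pvLookMat rest x y

-- the loop body of A acting on the (score, gap) state; none = Python exception (KeyError)
def pvBodyA (matrix : List (String × String × Int)) (gap_open gap_extend : Int)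
    (st : Option (Int × Bool)) (c1 c2 : Char) : Option (Int × Bool) :=
  match st with
  | none => none
  | some sg =>
    let score := sg.1
    let gap := sg.2
    if gap = false then
      if c1 = '-' ∨ c2 = '-' then some (score + gap_open, true)
      else
        match pvLookMat matrix c1 c2 with
        | some v => some (score + v, gap)
        | none =>
          match pvLookMat matrix c2 c1 with
          | some v => some (score + v, gap)
          | none => none
    else
      if ¬ (c1 = '-' ∨ c2 = '-') then
        match pvLookMat matrix c1 c2 with
        | some v => some (score + v, false)
        | none =>
          match pvLookMat matrix c2 c1 with
          | some v => some (score + v, false)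
          | none => none
      else some (score + gap_extend, gap)

def score_pairwise (sequence1 : String) (sequence2 : String) (matrix : List (String × String × Int)) (gap_open : Int) (gap_extend : Int) : Int :=
  match (PySem.List.pyRange 0 (PySem.Str.len sequence1) 1).foldl
    (fun (st : Option (Int × Bool)) i =>
      match PySem.List.pyGet? sequence1.toList i, PySem.List.pyGet? sequence2.toList i with
      | some c1, some c2 => pvBodyA matrix gap_open gap_extend st c1 c2
      | some _, none => none
      | none, _ => none)
    (some (0, false)) with
  | some sg => sg.1
  | none => 0   -- unreachable under Pre_ (none = Python exception)

-- ===== PORT B =====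
-- pairs list growing left to right; none = IndexError already happened
def pvSnoc (acc : Option (List (Char × Char))) (p : Char × Char) : Option (List (Char × Char)) :=
  match acc with
  | some l => some (l ++ [p])
  | none => none

-- the run-building step of Source B: append p to the last run if it has the same
-- gap flag g, otherwise start a new run (g, [p])
def pvAddLast : List (Bool × List (Char × Char)) → Bool → (Char × Char) → List (Bool × List (Char × Char))
  | [], g, p => [(g, [p])]
  | [r], g, p => if r.1 = g then [(r.1, r.2 ++ [p])] else [r, (g, [p])]
  | r :: rest, g, p => r :: pvAddLast rest g p

-- exception-tracking integer addition (none = a KeyError happened)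
def pvOptAdd : Option Int → Option Int → Option Int
  | some a, some b => some (a + b)
  | _, _ => none

-- lookup(p) of Source B: matrix[p] with the reversed-pair fallback; none = KeyError
def pvLookOpt (matrix : List (String × String × Int)) (p : Char × Char) : Option Int :=
  match pvLookMat matrix p.1 p.2 with
  | some v => some v
  | none => pvLookMat matrix p.2 p.1

-- sum(lookup(p) for p in run) (port of Python's sum over the generator)
def pvSumLook (matrix : List (String × String × Int)) : List (Char × Char) → Option Int
  | [] => some 0
  | p :: rest => pvOptAdd (pvLookOpt matrix p) (pvSumLook matrix rest)

-- score of one run: closed form for a gap run, lookup sum for a non-gap run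
def pvRunScore (matrix : List (String × String × Int)) (gap_open gap_extend : Int)
    (r : Bool × List (Char × Char)) : Option Int :=
  if r.1 then some (gap_open + gap_extend * ((r.2.length : Int) - 1))
  else pvSumLook matrix r.2

def score_pairwise_alt (sequence1 : String) (sequence2 : String) (matrix : List (String × String × Int)) (gap_open : Int) (gap_extend : Int) : Int :=
  -- pairs = [(sequence1[i], sequence2[i]) for i in range(len(sequence1))]
  match (PySem.List.pyRange 0 (PySem.Str.len sequence1) 1).foldl
    (fun (acc : Option (List (Char × Char))) i =>
      match PySem.List.pyGet? sequence1.toList i, PySem.List.pyGet? sequence2.toList i with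
      | some a, some b => pvSnoc acc (a, b)
      | some _, none => none
      | none, _ => none)
    (some []) with
  | none => 0   -- unreachable under Pre_ (IndexError)
  | some pairs =>
    -- runs: maximal consecutive blocks with the same gap flag
    let runs := pairs.foldl (fun rs p => pvAddLast rs (decide (p.1 = '-' ∨ p.2 = '-')) p) []
    -- score = sum of the run contributions
    match runs.foldl (fun acc r => pvOptAdd acc (pvRunScore matrix gap_open gap_extend r)) (some 0) with
    | some s => s
    | none => 0   -- unreachable under Pre_ (KeyError)

-- ===== PRECONDITION & SPEC =====
-- Pre_ excludes exactly the inputs where Python A raises: sequence2 shorter than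
-- sequence1 (IndexError), and an aligned gap-free pair missing from the matrix in
-- both orientations (KeyError).
def Pre_score_pairwise (sequence1 : String) (sequence2 : String) (matrix : List (String × String × Int)) (gap_open : Int) (gap_extend : Int) : Prop :=
  sequence1.toList.length ≤ sequence2.toList.length ∧
  ∀ p ∈ sequence1.toList.zip sequence2.toList,
    p.1 = '-' ∨ p.2 = '-' ∨
    (∃ q ∈ matrix, q.1.toList = [p.1] ∧ q.2.1.toList = [p.2]) ∨
    (∃ q ∈ matrix, q.1.toList = [p.2] ∧ q.2.1.toList = [p.1])
instance (sequence1 : String) (sequence2 : String) (matrix : List (String × String × Int)) (gap_open : Int) (gap_extend : Int) : Decidable (Pre_score_pairwise sequence1 sequence2 matrix gap_open gap_extend) := by unfold Pre_score_pairwise; infer_instance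

def pvWitness_score_pairwise : String × String × (List (String × String × Int)) × Int × Int :=
  ("AB-", "A-A", [("A", "A", 2), ("B", "B", 3)], -5, -1)

def Spec_score_pairwise (sequence1 : String) (sequence2 : String) (matrix : List (String × String × Int)) (gap_open : Int) (gap_extend : Int) (out : Int) : Prop := out = score_pairwise_alt sequence1 sequence2 matrix gap_open gap_extend
instance (sequence1 : String) (sequence2 : String) (matrix : List (String × String × Int)) (gap_open : Int) (gap_extend : Int) (out : Int) : Decidable (Spec_score_pairwise sequence1 sequence2 matrix gap_open gap_extend out) := by unfold Spec_score_pairwise; infer_instance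

-- ===== CLAIM (what is proved, stated in full; the proofs are below) =====
def Claim_equal_score_pairwise : Prop := ∀ (sequence1 : String) (sequence2 : String) (matrix : List (String × String × Int)) (gap_open : Int) (gap_extend : Int), Dom_score_pairwise sequence1 sequence2 matrix gap_open gap_extend → Pre_score_pairwise sequence1 sequence2 matrix gap_open gap_extend → Spec_score_pairwise sequence1 sequence2 matrix gap_open gap_extend (score_pairwise sequence1 sequence2 matrix gap_open gap_extend)

-- ===== LEMMAS AND PROOFS =====

-- value actually added by a successful matrix lookup (try/except chain)
def pvLookVal (matrix : List (String × String × Int)) (p : Char × Char) : Int :=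
  match pvLookMat matrix p.1 p.2 with
  | some v => v
  | none => (pvLookMat matrix p.2 p.1).getD 0

-- the run of scores A accumulates over a pair list, starting from gap flag g
def pvAsum (matrix : List (String × String × Int)) (gap_open gap_extend : Int) :
    Bool → List (Char × Char) → Int
  | _, [] => 0
  | g, p :: rest =>
    (if p.1 = '-' ∨ p.2 = '-' then (if g then gap_extend else gap_open) else pvLookVal matrix p) +
    pvAsum matrix gap_open gap_extend (decide (p.1 = '-' ∨ p.2 = '-')) rest

def pvEndGap : Bool → List (Char × Char) → Bool
  | g, [] => g
  | _, p :: rest => pvEndGap (decide (p.1 = '-' ∨ p.2 = '-')) rest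

-- gap flag of the last run (false for the empty run list)
def pvLastG : List (Bool × List (Char × Char)) → Bool
  | [] => false
  | [r] => r.1
  | _ :: rest => pvLastG rest

-- recursive sum of the run scores
def pvSumR (matrix : List (String × String × Int)) (go ge : Int) :
    List (Bool × List (Char × Char)) → Option Int
  | [] => some 0
  | r :: rest => pvOptAdd (pvRunScore matrix go ge r) (pvSumR matrix go ge rest)

def pvGood (matrix : List (String × String × Int)) (ps : List (Char × Char)) : Prop :=
  ∀ p ∈ ps, ¬ (p.1 = '-' ∨ p.2 = '-') →
    (pvLookMat matrix p.1 p.2).isSome = true ∨ (pvLookMat matrix p.2 p.1).isSome = true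

theorem pvLookMat_isSome (matrix : List (String × String × Int)) (x y : Char) :
    (pvLookMat matrix x y).isSome = true ↔
      ∃ q ∈ matrix, q.1.toList = [x] ∧ q.2.1.toList = [y] := by
  induction matrix with
  | nil => simp [pvLookMat]
  | cons q rest ih =>
    obtain ⟨a, b, v⟩ := q
    by_cases h : a.toList = [x] ∧ b.toList = [y] <;> simp [pvLookMat, h, ih]

theorem pvLookOpt_eq (matrix : List (String × String × Int)) (p : Char × Char)
    (h : (pvLookMat matrix p.1 p.2).isSome = true ∨ (pvLookMat matrix p.2 p.1).isSome = true) :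
    pvLookOpt matrix p = some (pvLookVal matrix p) := by
  unfold pvLookOpt pvLookVal
  rcases h1 : pvLookMat matrix p.1 p.2 with _ | v
  · rcases h2 : pvLookMat matrix p.2 p.1 with _ | w
    · exfalso; rcases h with h | h <;> simp [h1, h2] at h
    · simp [h1, h2]
  · simp [h1]

theorem pvOptAdd_zero (a : Option Int) : pvOptAdd a (some 0) = a := by
  cases a <;> simp [pvOptAdd]

theorem pvOptAdd_assoc (a b c : Option Int) :
    pvOptAdd (pvOptAdd a b) c = pvOptAdd a (pvOptAdd b c) := by
  cases a <;> cases b <;> cases c <;> simp [pvOptAdd] <;> ring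

-- the common index loop of both ports, turned into a structural fold over the zip
theorem pvFoldIdx {β : Type} (l1 l2 : List Char) (h : l1.length ≤ l2.length)
    (f : β → Char → Char → β) (c : β) :
    ∀ (d k : Nat) (init : β), k + d = l1.length →
    (PySem.List.pyRange (k : Int) ((l1.length : Nat) : Int) 1).foldl
      (fun st i =>
        match PySem.List.pyGet? l1 i, PySem.List.pyGet? l2 i with
        | some a, some b => f st a b
        | some _, none => c
        | none, _ => c) init
      = ((l1.drop k).zip (l2.drop k)).foldl (fun st p => f st p.1 p.2) init := by
  intro d
  induction d with
  | zero =>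
    intro k init hk
    have hk' : k = l1.length := by omega
    subst hk'
    rw [PySem.List.pyRange_one_eq_nil (by omega)]
    rw [List.drop_eq_nil_of_le (le_refl _)]
    simp
  | succ d ih =>
    intro k init hk
    have hklt : k < l1.length := by omega
    have hklt2 : k < l2.length := by omega
    rw [PySem.List.pyRange_one_cons (by exact_mod_cast hklt)]
    rw [List.foldl_cons]
    rw [PySem.List.pyGet?_natCast, PySem.List.pyGet?_natCast]
    rw [List.getElem?_eq_getElem hklt, List.getElem?_eq_getElem hklt2]
    rw [List.drop_eq_getElem_cons hklt, List.drop_eq_getElem_cons hklt2]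
    rw [List.zip_cons_cons, List.foldl_cons]
    have : ((k : Int) + 1) = ((k + 1 : Nat) : Int) := by push_cast; ring
    rw [this, ih (k + 1) _ (by omega)]

theorem pvFoldIdx0 {β : Type} (l1 l2 : List Char) (h : l1.length ≤ l2.length)
    (f : β → Char → Char → β) (c : β) (init : β) :
    (PySem.List.pyRange 0 ((l1.length : Nat) : Int) 1).foldl
      (fun st i =>
        match PySem.List.pyGet? l1 i, PySem.List.pyGet? l2 i with
        | some a, some b => f st a b
        | some _, none => c
        | none, _ => c) init
      = (l1.zip l2).foldl (fun st p => f st p.1 p.2) init := by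
  have := pvFoldIdx l1 l2 h f c l1.length 0 init (by omega)
  simpa using this

-- A's loop over the pair list computes pvAsum
theorem pvFoldA (matrix : List (String × String × Int)) (go ge : Int) :
    ∀ (ps : List (Char × Char)), pvGood matrix ps → ∀ (s : Int) (g : Bool),
    ps.foldl (fun st p => pvBodyA matrix go ge st p.1 p.2) (some (s, g))
      = some (s + pvAsum matrix go ge g ps, pvEndGap g ps) := by
  intro ps
  induction ps with
  | nil => intro _ s g; simp [pvAsum, pvEndGap]
  | cons p rest ih =>
    intro hg s g
    have hgrest : pvGood matrix rest := fun q hq => hg q (by simp [hq])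
    have hstep : pvBodyA matrix go ge (some (s, g)) p.1 p.2
        = some (s + (if p.1 = '-' ∨ p.2 = '-' then (if g then ge else go) else pvLookVal matrix p),
                decide (p.1 = '-' ∨ p.2 = '-')) := by
      by_cases hgap : p.1 = '-' ∨ p.2 = '-'
      · cases g <;> simp [pvBodyA, hgap]
      · have hlk := hg p (by simp) hgap
        cases g <;>
        · simp only [pvBodyA, hgap]
          rcases h1 : pvLookMat matrix p.1 p.2 with _ | v
          · rcases h2 : pvLookMat matrix p.2 p.1 with _ | w
            · exfalso; rcases hlk with h | h <;> simp [h1, h2] at h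
            · simp [pvLookVal, h1, h2]
          · simp [pvLookVal, h1]
    rw [List.foldl_cons, hstep, ih hgrest]
    have : s + (if p.1 = '-' ∨ p.2 = '-' then (if g then ge else go) else pvLookVal matrix p)
        + pvAsum matrix go ge (decide (p.1 = '-' ∨ p.2 = '-')) rest
        = s + pvAsum matrix go ge g (p :: rest) := by
      simp [pvAsum]; ring
    rw [this]
    rfl

-- B's pair-building loop returns the zip
theorem pvFoldSnoc : ∀ (ps l : List (Char × Char)),
    ps.foldl (fun acc p => pvSnoc acc (p.1, p.2)) (some l) = some (l ++ ps) := by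
  intro ps
  induction ps with
  | nil => intro l; simp
  | cons p rest ih =>
    intro l
    rw [List.foldl_cons]
    show rest.foldl _ (some (l ++ [(p.1, p.2)])) = _
    rw [ih (l ++ [(p.1, p.2)])]
    simp

theorem pvSumLook_append (matrix : List (String × String × Int)) :
    ∀ (l : List (Char × Char)) (p : Char × Char),
    pvSumLook matrix (l ++ [p]) = pvOptAdd (pvSumLook matrix l) (pvLookOpt matrix p) := by
  intro l
  induction l with
  | nil => intro p; simp [pvSumLook, pvOptAdd_zero]; cases pvLookOpt matrix p <;> simp [pvOptAdd]
  | cons q rest ih =>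
    intro p
    simp only [List.cons_append, pvSumLook, ih, pvOptAdd_assoc]

-- the last-run flag after the run-building step is the gap flag just processed
theorem pvLastG_addLast : ∀ (rs : List (Bool × List (Char × Char))) (g : Bool) (p : Char × Char),
    pvLastG (pvAddLast rs g p) = g := by
  intro rs
  induction rs with
  | nil => intro g p; simp [pvAddLast, pvLastG]
  | cons r rest ih =>
    intro g p
    cases rest with
    | nil =>
      by_cases h : r.1 = g <;> simp [pvAddLast, h, pvLastG]
    | cons r2 rest2 =>
      show pvLastG (r :: pvAddLast (r2 :: rest2) g p) = g
      have hne : pvAddLast (r2 :: rest2) g p ≠ [] := by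
        cases rest2 with
        | nil => by_cases h : r2.1 = g <;> simp [pvAddLast, h]
        | cons a b => simp [pvAddLast]
      rcases hx : pvAddLast (r2 :: rest2) g p with _ | ⟨y, ys⟩
      · exact absurd hx hne
      · show pvLastG (r :: y :: ys) = g
        have := ih g p
        rw [hx] at this
        exact this

-- how one run-building step changes the run-score sum
theorem pvSumR_addLast (matrix : List (String × String × Int)) (go ge : Int) :
    ∀ (rs : List (Bool × List (Char × Char))) (g : Bool) (p : Char × Char),
    pvSumR matrix go ge (pvAddLast rs g p)
      = pvOptAdd (pvSumR matrix go ge rs)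
          (if g then some (if pvLastG rs then ge else go) else pvLookOpt matrix p) := by
  intro rs
  induction rs with
  | nil =>
    intro g p
    cases g <;>
      simp [pvAddLast, pvSumR, pvRunScore, pvSumLook, pvLastG, pvOptAdd, pvOptAdd_zero] <;>
      cases pvLookOpt matrix p <;> simp [pvOptAdd]
  | cons r rest ih =>
    intro g p
    cases rest with
    | nil =>
      by_cases h : r.1 = g
      · subst h
        show pvSumR matrix go ge (if r.1 = r.1 then [(r.1, r.2 ++ [p])] else _) = _
        rw [if_pos rfl]
        cases hg : r.1 with
        | true =>
          simp only [pvSumR, pvRunScore, hg, if_pos, pvLastG, pvOptAdd_zero]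
          simp [pvOptAdd]
          push_cast
          ring
        | false =>
          simp only [pvSumR, pvRunScore, hg, Bool.false_eq_true, if_false, pvLastG, pvOptAdd_zero]
          rw [pvSumLook_append]
      · show pvSumR matrix go ge (if r.1 = g then _ else [r, (g, [p])]) = _
        rw [if_neg h]
        have hL : pvLastG [r] = r.1 := rfl
        cases g with
        | true =>
          have hr : r.1 = false := by revert h; cases r.1 <;> simp
          simp [pvSumR, pvRunScore, pvSumLook, hr, pvOptAdd_zero, pvOptAdd_assoc, pvLastG]
        | false =>
          simp [pvSumR, pvRunScore, pvSumLook, pvOptAdd_zero, pvOptAdd_assoc, pvLastG]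
    | cons r2 rest2 =>
      show pvSumR matrix go ge (r :: pvAddLast (r2 :: rest2) g p) = _
      have hL : pvLastG (r :: r2 :: rest2) = pvLastG (r2 :: rest2) := rfl
      simp only [pvSumR, ih g p, hL, pvOptAdd_assoc]

-- the whole run-building fold: run-score sum = A's accumulated score
theorem pvFoldRuns (matrix : List (String × String × Int)) (go ge : Int) :
    ∀ (ps : List (Char × Char)), pvGood matrix ps →
    ∀ (rs : List (Bool × List (Char × Char))) (s : Int),
    pvSumR matrix go ge rs = some s →
    pvSumR matrix go ge
        (ps.foldl (fun rs p => pvAddLast rs (decide (p.1 = '-' ∨ p.2 = '-')) p) rs)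
      = some (s + pvAsum matrix go ge (pvLastG rs) ps) := by
  intro ps
  induction ps with
  | nil => intro _ rs s hs; simpa [pvAsum] using hs
  | cons p rest ih =>
    intro hg rs s hs
    have hgrest : pvGood matrix rest := fun q hq => hg q (by simp [hq])
    rw [List.foldl_cons]
    have hstep := pvSumR_addLast matrix go ge rs (decide (p.1 = '-' ∨ p.2 = '-')) p
    have hc : (if decide (p.1 = '-' ∨ p.2 = '-') then some (if pvLastG rs then ge else go)
          else pvLookOpt matrix p)
        = some (if p.1 = '-' ∨ p.2 = '-' then (if pvLastG rs then ge else go)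
          else pvLookVal matrix p) := by
      by_cases hgap : p.1 = '-' ∨ p.2 = '-'
      · simp [hgap]
      · simp only [hgap, decide_false, Bool.false_eq_true, if_false]
        exact pvLookOpt_eq matrix p (hg p (by simp) hgap)
    rw [hc, hs] at hstep
    have hs' : pvSumR matrix go ge (pvAddLast rs (decide (p.1 = '-' ∨ p.2 = '-')) p)
        = some (s + (if p.1 = '-' ∨ p.2 = '-' then (if pvLastG rs then ge else go)
            else pvLookVal matrix p)) := by
      rw [hstep]; rfl
    rw [ih hgrest _ _ hs', pvLastG_addLast]
    simp [pvAsum]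
    ring

-- B's top-level run loop is the recursive run-score sum
theorem pvFoldSumR (matrix : List (String × String × Int)) (go ge : Int) :
    ∀ (rs : List (Bool × List (Char × Char))) (a : Option Int),
    rs.foldl (fun acc r => pvOptAdd acc (pvRunScore matrix go ge r)) a
      = pvOptAdd a (pvSumR matrix go ge rs) := by
  intro rs
  induction rs with
  | nil => intro a; simp [pvSumR, pvOptAdd_zero]
  | cons r rest ih =>
    intro a
    rw [List.foldl_cons, ih, pvSumR, pvOptAdd_assoc]

theorem pvPre_good (sequence1 sequence2 : String) (matrix : List (String × String × Int))
    (go ge : Int) (h : Pre_score_pairwise sequence1 sequence2 matrix go ge) :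
    pvGood matrix (sequence1.toList.zip sequence2.toList) := by
  intro p hp hgap
  rcases h.2 p hp with h1 | h1 | h1 | h1
  · exact absurd (Or.inl h1) hgap
  · exact absurd (Or.inr h1) hgap
  · exact Or.inl ((pvLookMat_isSome matrix p.1 p.2).mpr h1)
  · exact Or.inr ((pvLookMat_isSome matrix p.2 p.1).mpr h1)

-- ===== VERDICT (by name: the statement is the Claim_ definition above) =====
theorem score_pairwise_spec : Claim_equal_score_pairwise := by
  intro s1 s2 matrix go ge _ hpre
  unfold Spec_score_pairwise
  have hlen := hpre.1
  have hgood := pvPre_good s1 s2 matrix go ge hpre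
  unfold score_pairwise score_pairwise_alt
  rw [PySem.Str.len_eq]
  rw [pvFoldIdx0 s1.toList s2.toList hlen (pvBodyA matrix go ge) none (some (0, false))]
  rw [pvFoldIdx0 s1.toList s2.toList hlen (fun acc a b => pvSnoc acc (a, b)) none (some [])]
  rw [pvFoldA matrix go ge _ hgood 0 false]
  rw [pvFoldSnoc (s1.toList.zip s2.toList) []]
  simp only [List.nil_append]
  rw [pvFoldSumR matrix go ge]
  rw [pvFoldRuns matrix go ge _ hgood [] 0 rfl]
  show (0 : Int) + pvAsum matrix go ge false _ = _
  have : pvLastG ([] : List (Bool × List (Char × Char))) = false := rfl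
  rw [this]
  show _ = (pvOptAdd (some 0) (some (0 + pvAsum matrix go ge false (s1.toList.zip s2.toList)))).getD 0
  simp [pvOptAdd]
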